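-- pv_equiv track=rewrite | github.com/afzalsiddique/problem-solving | Problem_Solving_Python/IntelligentMachine/SolarPanel.py | takeY
-- ===== SOURCE A (Python) =====
-- def takeY(A,x,y):
--     A.sort(reverse=True)
--     total=sum(A)
--     current=0
--     cost=0
--     i=0
--     while current<total:
--         current+=2*A[i]
--         cost+=y
--     return cost
-- ===== SOURCE B (Python) =====
-- def takeY(A, x, y):
--     A.sort(reverse=True)
--     total = sum(A)
--     if total <= 0:
--         return 0
--     m = A[0]
--     return y * ((total + 2 * m - 1) // (2 * m))
-- ===== Notes on version B (the rewrite author's own statement) =====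
-- stated objective: simpler
-- what changed: Replaces the accumulating while-loop (which repeatedly adds 2*A[0], the maximum, since i is never incremented) by a closed-form integer ceiling division y * ceil(total/(2*max)); the in-place reverse sort is kept.
import Mathlib
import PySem

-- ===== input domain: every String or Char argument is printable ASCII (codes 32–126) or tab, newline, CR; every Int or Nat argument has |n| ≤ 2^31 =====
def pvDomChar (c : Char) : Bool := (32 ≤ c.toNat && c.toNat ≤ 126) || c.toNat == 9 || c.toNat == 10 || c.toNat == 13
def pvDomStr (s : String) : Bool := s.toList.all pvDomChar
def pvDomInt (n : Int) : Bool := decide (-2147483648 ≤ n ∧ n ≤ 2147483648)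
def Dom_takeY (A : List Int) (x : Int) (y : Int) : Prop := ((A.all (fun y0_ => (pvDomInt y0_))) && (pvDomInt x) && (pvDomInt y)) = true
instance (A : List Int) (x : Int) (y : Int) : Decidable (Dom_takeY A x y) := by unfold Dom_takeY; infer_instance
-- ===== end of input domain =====

-- B replaces A's accumulating while-loop by a closed-form integer ceiling division (objective: simpler).
-- Note: the Python A sorts its argument in place; this is mirrored by B and the equivalence proved is about the return value.


-- ===== PORT A =====
-- while current < total: current += 2*A[i]; cost += y   (i stays 0, so A[i] is the head of the
-- descending-sorted list). Fuel total.toNat is enough: when the loop runs, total > 0 and the head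
-- is ≥ 1, so each iteration adds at least 2; the fuel-exhausted branch is never reached.
def takeYLoop (total m y : Int) : Nat → Int → Int → Int
  | 0, _, cost => cost
  | fuel + 1, current, cost =>
    if current < total then takeYLoop total m y fuel (current + 2 * m) (cost + y) else cost

def takeY (A : List Int) (x : Int) (y : Int) : Int :=
  let As := PySem.List.sorted A (fun v => v) true   -- A.sort(reverse=True)
  let total := As.sum
  -- A[0]; the list is nonempty whenever the loop body runs (total > 0), so the default is unreachable
  takeYLoop total ((PySem.List.pyGet? As 0).getD 0) y total.toNat 0 0

-- ===== PORT B =====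
def takeY_alt (A : List Int) (x : Int) (y : Int) : Int :=
  let As := PySem.List.sorted A (fun v => v) true   -- A.sort(reverse=True)
  let total := As.sum
  if total ≤ 0 then 0
  else
    -- A[0]; nonempty here since total > 0
    let m := (PySem.List.pyGet? As 0).getD 0
    y * PySem.Int.floordiv (total + 2 * m - 1) (2 * m)

-- ===== PRECONDITION & SPEC =====
def Spec_takeY (A : List Int) (x : Int) (y : Int) (out : Int) : Prop := out = takeY_alt A x y
instance (A : List Int) (x : Int) (y : Int) (out : Int) : Decidable (Spec_takeY A x y out) := by unfold Spec_takeY; infer_instance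

-- ===== CLAIM (what is proved, stated in full; the proofs are below) =====
def Claim_equal_takeY : Prop := ∀ (A : List Int) (x : Int) (y : Int), Dom_takeY A x y → Spec_takeY A x y (takeY A x y)

-- ===== LEMMAS AND PROOFS =====

-- ceil-division step: ceil((t)/s) = ceil((t-s)/s) + 1, written with floordiv (s > 0)
lemma fd_step (t s : Int) (hs : 0 < s) :
    PySem.Int.floordiv (t + s - 1) s = PySem.Int.floordiv (t - 1) s + 1 := by
  have hq := (PySem.Int.floordiv_eq_iff_of_pos (a := t - 1) (b := s)
    (q := PySem.Int.floordiv (t - 1) s) hs).mp rfl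
  refine (PySem.Int.floordiv_eq_iff_of_pos hs).mpr ⟨?_, ?_⟩ <;> nlinarith [hq.1, hq.2]

-- ceil-division base: 0 < t ≤ s → ceil(t/s) = 1
lemma fd_one (t s : Int) (hs : 0 < s) (h1 : 0 < t) (h2 : t ≤ s) :
    PySem.Int.floordiv (t + s - 1) s = 1 := by
  refine (PySem.Int.floordiv_eq_iff_of_pos hs).mpr ⟨by omega, by nlinarith⟩

lemma takeYLoop_eq (total m y : Int) (hm : 0 < m) :
    ∀ (fuel : Nat) (current cost : Int), total ≤ current + 2 * m * fuel →
      takeYLoop total m y fuel current cost =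
        cost + (if current < total then
          y * PySem.Int.floordiv ((total - current) + 2 * m - 1) (2 * m) else 0) := by
  intro fuel
  induction fuel with
  | zero =>
    intro current cost h
    have : ¬ current < total := by push_cast at h; omega
    simp [takeYLoop, this]
  | succ n ih =>
    intro current cost h
    by_cases hlt : current < total
    · have hfuel : total ≤ (current + 2 * m) + 2 * m * n := by
        have : 2 * m * ((n : Int) + 1) = 2 * m + 2 * m * n := by ring
        push_cast at h ⊢; linarith [h, this]
      rw [show takeYLoop total m y (n + 1) current cost
            = takeYLoop total m y n (current + 2 * m) (cost + y) by simp [takeYLoop, hlt],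
          ih (current + 2 * m) (cost + y) hfuel]
      by_cases h2 : current + 2 * m < total
      · have hstep := fd_step (total - current) (2 * m) (by omega)
        have he : total - (current + 2 * m) + 2 * m - 1 = total - current - 1 := by ring
        simp only [hlt, h2, if_true, he, hstep]
        ring
      · have hone := fd_one (total - current) (2 * m) (by omega) (by omega) (by omega)
        simp only [hlt, h2, if_true, if_false, hone]
        ring
    · simp [takeYLoop, hlt]

-- sum of a list of nonpositive ints is nonpositive
lemma sum_nonpos_of_forall (l : List Int) (h : ∀ a ∈ l, a ≤ 0) : l.sum ≤ 0 := by
  induction l with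
  | nil => simp
  | cons b t ih =>
    have := h b (by simp)
    have := ih (fun a ha => h a (by simp [ha]))
    simp [List.sum_cons]; omega

-- ===== VERDICT (by name: the statement is the Claim_ definition above) =====
theorem takeY_spec : Claim_equal_takeY := by
  intro A x y _hd
  unfold Spec_takeY takeY takeY_alt
  set As := PySem.List.sorted A (fun v => v) true with hAs
  by_cases hT : As.sum ≤ 0
  · have h0 : As.sum.toNat = 0 := by omega
    simp [hT, h0, takeYLoop]
  · push_neg at hT
    have hne : As ≠ [] := by
      intro h; rw [h] at hT; simp at hT
    obtain ⟨m, rest, hcons⟩ := List.exists_cons_of_ne_nil hne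
    -- the head of the descending sort bounds every element
    have hhead := PySem.List.key_head_sorted_rev_ge (xs := A) (key := fun v => v)
      (m := m) (t := rest) (by rw [← hAs, hcons])
    -- some element of A is positive, since the sum is
    have hpos : ∃ a ∈ A, 0 < a := by
      by_contra hc
      push_neg at hc
      have : ∀ a ∈ As, a ≤ 0 := fun a ha =>
        hc a ((PySem.List.mem_sorted A (fun v => v) true a).mp (hAs ▸ ha))
      exact absurd (sum_nonpos_of_forall As this) (by omega)
    obtain ⟨a, haA, ha⟩ := hpos
    have hm : 0 < m := lt_of_lt_of_le ha (hhead a haA)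
    have hget : (PySem.List.pyGet? As 0).getD 0 = m := by
      rw [hcons]; simp [PySem.List.pyGet?, PySem.List.pyIdx?]
    rw [hcons] at hget ⊢
    dsimp only
    rw [hget]
    have hfuel : (m :: rest).sum ≤ 0 + 2 * m * ((m :: rest).sum.toNat : Int) := by
      have : ((m :: rest).sum.toNat : Int) = (m :: rest).sum := by
        rw [hcons] at hT; omega
      rw [this]
      nlinarith [hT, hm, hcons ▸ hT]
    rw [takeYLoop_eq (m :: rest).sum m y hm (m :: rest).sum.toNat 0 0 hfuel]
    rw [hcons] at hT
    have hnot : ¬ (m :: rest).sum ≤ 0 := by omega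
    rw [if_pos hT, if_neg hnot]
    norm_num
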